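-- pv_equiv track=rewrite | github.com/davide1729/contest23 | robottini/managers/checker.py | prepare_connections
-- ===== SOURCE A (Python) =====
-- def get_divisors(n):
--     div = []
--     for ii in range(2, int(n/2) + 1):
--         if n % ii == 0:
--             div.append(ii)
--     div.append(n)
--     return div
--
-- def prepare_connections(N):
--     # creating dictionary "divisors_dict" containing for each integer up to N a list of its divisors
--     divisors_dict = {}
--     for ii in range(2, N+1):
--         divisors_dict[ii] = get_divisors(ii)
--
--     # creating dictionary "connections_dict" containing for each integer up to N a list of its divisors and their multiples
--     connections_dict = divisors_dict.copy()
--     for ii in range(2, N+1):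
--         for jj in divisors_dict[ii]:
--             for kk in range(2,N+1):
--                 if (jj in divisors_dict[kk]) and (kk not in connections_dict[ii]):
--                     connections_dict[ii] = connections_dict[ii]+[kk]
--
--     return(connections_dict)
-- ===== SOURCE B (Python) =====
-- def prepare_connections(N):
--     # Per-n trial division over the full range (the lone divisor above n//2 is n itself),
--     # then multiples-stepping with a hash set instead of scanning all kk with a list lookup.
--     divisors = {n: [d for d in range(2, n + 1) if n % d == 0] for n in range(2, N + 1)}
--     conn = {}
--     for n in range(2, N + 1):
--         lst = list(divisors[n])
--         seen = set(lst)
--         for j in divisors[n]: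
--             for k in range(j, N + 1, j):
--                 if k not in seen:
--                     seen.add(k)
--                     lst.append(k)
--         conn[n] = lst
--     return conn
-- ===== Notes on version B (the rewrite author's own statement) =====
-- stated objective: faster
-- what changed: B drops A's cubic connection pass (for every pair ii,kk a membership scan of kk's divisor list and a list-membership test on the growing connection list) and instead steps directly through the multiples of each divisor, using a hash set for the already-connected test; divisors come from one trial-division filter per integer instead of a loop with a separate final append.
import Mathlib
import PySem

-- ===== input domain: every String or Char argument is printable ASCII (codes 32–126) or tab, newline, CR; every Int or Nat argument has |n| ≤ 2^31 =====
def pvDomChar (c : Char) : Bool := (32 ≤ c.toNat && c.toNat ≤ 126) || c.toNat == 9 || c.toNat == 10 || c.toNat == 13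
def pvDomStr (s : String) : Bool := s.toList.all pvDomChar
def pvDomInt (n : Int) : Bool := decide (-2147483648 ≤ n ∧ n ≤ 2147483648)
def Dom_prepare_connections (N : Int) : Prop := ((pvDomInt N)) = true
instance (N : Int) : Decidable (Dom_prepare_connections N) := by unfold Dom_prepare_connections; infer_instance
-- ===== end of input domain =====

-- B replaces A's cubic inner membership scans ("jj in divisors_dict[kk]" over all kk) by stepping
-- through the multiples of each divisor with a hash set for the already-connected check; same
-- dict, same list order. Return-value equivalence; neither version mutates its argument.

-- ===== PORT A =====
def get_divisors (n : Int) : List Int :=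
  -- int(n/2): exact as truncating division for |n| ≤ 2^31 (float division is exact there)
  let div := (PySem.List.pyRange 2 (PySem.Int.truncdiv n 2 + 1) 1).foldl
    (fun div ii => if PySem.Int.mod n ii == 0 then div ++ [ii] else div) []
  div ++ [n]

def prepare_connections (N : Int) : List (Int × List Int) :=
  let divisors_dict : PySem.Dict Int (List Int) :=
    (PySem.List.pyRange 2 (N + 1) 1).foldl (fun d ii => d.insert ii (get_divisors ii))
      PySem.Dict.empty
  let connections_dict :=
    (PySem.List.pyRange 2 (N + 1) 1).foldl (fun c ii =>
      (divisors_dict.getD ii []).foldl (fun c jj =>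
        (PySem.List.pyRange 2 (N + 1) 1).foldl (fun c kk =>
          if (divisors_dict.getD kk []).contains jj && !((c.getD ii []).contains kk)
          then c.insert ii (c.getD ii [] ++ [kk]) else c) c) c) divisors_dict
  connections_dict.items

-- ===== PORT B =====
def altDivisors (n : Int) : List Int :=
  (PySem.List.pyRange 2 (n + 1) 1).filter (fun d => PySem.Int.mod n d == 0)

-- the seen/lst loop of Source B: walk the multiples of each divisor, skip what the set has seen
def altConnect (divs : List Int) (N : Int) : List Int :=
  (divs.foldl (fun sl j =>
      (PySem.List.pyRange j (N + 1) j).foldl (fun sl k =>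
        if sl.1.contains k then sl else (sl.1.add k, sl.2 ++ [k])) sl)
    ((PySem.Set.ofList divs : PySem.Set Int), divs)).2

def prepare_connections_alt (N : Int) : List (Int × List Int) :=
  let divisors : PySem.Dict Int (List Int) :=
    (PySem.List.pyRange 2 (N + 1) 1).foldl (fun d n => d.insert n (altDivisors n))
      PySem.Dict.empty
  let conn : PySem.Dict Int (List Int) :=
    (PySem.List.pyRange 2 (N + 1) 1).foldl (fun c n => c.insert n (altConnect (divisors.getD n []) N))
      PySem.Dict.empty
  conn.items

-- ===== PRECONDITION & SPEC =====
def Spec_prepare_connections (N : Int) (out : List (Int × List Int)) : Prop := out = prepare_connections_alt N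
instance (N : Int) (out : List (Int × List Int)) : Decidable (Spec_prepare_connections N out) := by unfold Spec_prepare_connections; infer_instance

-- ===== CLAIM (what is proved, stated in full; the proofs are below) =====
def Claim_equal_prepare_connections : Prop := ∀ (N : Int), Dom_prepare_connections N → Spec_prepare_connections N (prepare_connections N)

-- ===== LEMMAS AND PROOFS =====

-- A's divisors dictionary, as a standalone value (proof-side name for the fold in port A)
def divD (N : Int) : PySem.Dict Int (List Int) :=
  (PySem.List.pyRange 2 (N + 1) 1).foldl (fun d ii => d.insert ii (get_divisors ii))
    PySem.Dict.empty

-- A's per-key connection value, computed purely from the divisors dictionary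
def GA (dv : PySem.Dict Int (List Int)) (N : Int) (js v : List Int) : List Int :=
  js.foldl (fun l jj =>
    (PySem.List.pyRange 2 (N + 1) 1).foldl (fun l kk =>
      if (dv.getD kk []).contains jj && !(l.contains kk) then l ++ [kk] else l) l) v
lemma mem_altDivisors (n j : Int) : j ∈ altDivisors n ↔ 2 ≤ j ∧ j < n + 1 ∧ j ∣ n := by
  simp [altDivisors, List.mem_filter, PySem.List.mem_pyRange_one, PySem.Int.mod_eq_zero_iff_dvd,
    and_assoc]

lemma fold_insert_items (ks : List Int) (g : Int → List Int) (hk : ks.Nodup) :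
    (ks.foldl (fun d n => d.insert n (g n)) (PySem.Dict.empty : PySem.Dict Int (List Int))).items
      = ks.map (fun n => (n, g n)) := by
  have h := PySem.Dict.items_foldl_insert_fresh (l := ks) (k := fun a => a) (v := g)
    (d := PySem.Dict.empty) (fun a _ => PySem.Dict.contains_empty a)
    (by simpa using hk)
  simpa using h

lemma fold_insert_nodup_keys (ks : List Int) (g : Int → List Int) :
    (ks.foldl (fun d n => d.insert n (g n)) (PySem.Dict.empty : PySem.Dict Int (List Int))).keys.Nodup := by
  exact PySem.Dict.nodup_keys_foldl_insert ks (fun _ n => g n) _ (by simp [PySem.Dict.keys_empty])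

lemma fold_insert_contains (ks : List Int) (g : Int → List Int) (m : Int) (hm : m ∈ ks) :
    (ks.foldl (fun d n => d.insert n (g n)) (PySem.Dict.empty : PySem.Dict Int (List Int))).contains m = true := by
  rw [PySem.Dict.contains_iff_mem_keys, PySem.Dict.keys_foldl_insert (f := fun _ n => g n),
    PySem.Dict.keys_empty, PySem.Set.update_nil_left, PySem.Set.mem_ofList]
  exact hm

lemma fold_insert_getD (ks : List Int) (g : Int → List Int) (hk : ks.Nodup) (m : Int) (hm : m ∈ ks) :
    (ks.foldl (fun d n => d.insert n (g n)) (PySem.Dict.empty : PySem.Dict Int (List Int))).getD m [] = g m := by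
  apply PySem.Dict.getD_of_mem_items
  · rw [fold_insert_items ks g hk]
    exact List.mem_map.2 ⟨m, hm, rfl⟩
  · exact fold_insert_nodup_keys ks g

lemma insert_getD_self (d : PySem.Dict Int (List Int)) (k : Int)
    (hnd : d.keys.Nodup) (hc : d.contains k = true) : d.insert k (d.getD k []) = d := by
  apply PySem.Dict.ext
  rw [PySem.Dict.items_insert_of_contains d _ hc]
  have : ∀ p ∈ d.items, (if (p.1 == k) = true then (k, d.getD k []) else p) = p := by
    intro p hp
    by_cases h : p.1 = k
    · have hv : d.getD k [] = p.2 := by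
        have : (p.1, p.2) ∈ d.items := hp
        rw [← h]; exact PySem.Dict.getD_of_mem_items d this hnd []
      simp [h, hv]; exact Prod.ext h.symm rfl
    · simp [h]
  calc List.map (fun p => if (p.1 == k) = true then (k, d.getD k []) else p) d.items
      = List.map id d.items := List.map_congr_left (fun p hp => by rw [this p hp]; rfl)
    _ = d.items := List.map_id d.items
lemma divisors_eq (n : Int) (hn : 2 ≤ n) : get_divisors n = altDivisors n := by
  have htd : PySem.Int.truncdiv n 2 = n / 2 := Int.tdiv_eq_ediv_of_nonneg (by omega)
  have hq1 : (2:Int) ≤ n / 2 + 1 := by omega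
  have hq2 : n / 2 + 1 ≤ n := by omega
  unfold get_divisors altDivisors
  rw [PySem.List.foldl_append_if_eq_filter, List.nil_append, htd]
  rw [PySem.List.pyRange_one_append 2 (n / 2 + 1) (n + 1) hq1 (by omega),
    List.filter_append]
  have hsplit : PySem.List.pyRange (n / 2 + 1) (n + 1) 1
      = PySem.List.pyRange (n / 2 + 1) n 1 ++ [n] := PySem.List.pyRange_one_succ_right (by omega)
  rw [hsplit, List.filter_append]
  have h1 : (PySem.List.pyRange (n / 2 + 1) n 1).filter (fun d => PySem.Int.mod n d == 0) = [] := by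
    rw [List.filter_eq_nil_iff]
    intro d hd
    rw [PySem.List.mem_pyRange_one] at hd
    simp only [beq_iff_eq, PySem.Int.mod_eq_zero_iff_dvd]
    intro hdvd
    obtain ⟨c, hc⟩ := hdvd
    have hd2 : 2 ≤ d := by omega
    have hdn : d < n := hd.2
    have h2d : n < 2 * d := by omega
    rcases lt_trichotomy c 1 with h | h | h
    · nlinarith
    · rw [h, mul_one] at hc; omega
    · nlinarith
  have h2 : List.filter (fun d => PySem.Int.mod n d == 0) [n] = [n] := by
    simp [PySem.Int.mod_eq_zero_iff_dvd]
  rw [h1, h2, List.nil_append]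
lemma foldK (dv : PySem.Dict Int (List Int)) (jj ii : Int) (ks : List Int) :
    ∀ (c : PySem.Dict Int (List Int)), c.keys.Nodup → c.contains ii = true →
    ks.foldl (fun c kk =>
        if (dv.getD kk []).contains jj && !((c.getD ii []).contains kk)
        then c.insert ii (c.getD ii [] ++ [kk]) else c) c
      = c.insert ii (ks.foldl (fun l kk =>
          if (dv.getD kk []).contains jj && !(l.contains kk) then l ++ [kk] else l) (c.getD ii [])) := by
  induction ks with
  | nil => intro c hnd hc; simp [insert_getD_self c ii hnd hc]
  | cons kk ks ih =>
    intro c hnd hc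
    simp only [List.foldl_cons]
    by_cases h : ((dv.getD kk []).contains jj && !((c.getD ii []).contains kk)) = true
    · rw [if_pos h]
      rw [ih (c.insert ii (c.getD ii [] ++ [kk])) (PySem.Dict.nodup_keys_insert c ii _ hnd)
        (PySem.Dict.contains_insert_self c ii _)]
      rw [PySem.Dict.insert_insert_self, PySem.Dict.getD_insert_self, if_pos h]
    · rw [if_neg h, ih c hnd hc, if_neg h]

lemma foldJ (dv : PySem.Dict Int (List Int)) (N ii : Int) (js : List Int) :
    ∀ (c : PySem.Dict Int (List Int)), c.keys.Nodup → c.contains ii = true →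
    js.foldl (fun c jj =>
        (PySem.List.pyRange 2 (N + 1) 1).foldl (fun c kk =>
          if (dv.getD kk []).contains jj && !((c.getD ii []).contains kk)
          then c.insert ii (c.getD ii [] ++ [kk]) else c) c) c
      = c.insert ii (GA dv N js (c.getD ii [])) := by
  induction js with
  | nil => intro c hnd hc; simp [GA, insert_getD_self c ii hnd hc]
  | cons jj js ih =>
    intro c hnd hc
    simp only [List.foldl_cons]
    rw [foldK dv jj ii _ c hnd hc]
    rw [ih _ (PySem.Dict.nodup_keys_insert c ii _ hnd) (PySem.Dict.contains_insert_self c ii _)]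
    rw [PySem.Dict.insert_insert_self, PySem.Dict.getD_insert_self]
    rfl

lemma foldI (dv : PySem.Dict Int (List Int)) (N : Int) (ks : List Int) :
    ∀ (c : PySem.Dict Int (List Int)), c.keys.Nodup → ks.Nodup →
      (∀ k ∈ ks, c.contains k = true) →
    (ks.foldl (fun c ii =>
        (dv.getD ii []).foldl (fun c jj =>
          (PySem.List.pyRange 2 (N + 1) 1).foldl (fun c kk =>
            if (dv.getD kk []).contains jj && !((c.getD ii []).contains kk)
            then c.insert ii (c.getD ii [] ++ [kk]) else c) c) c) c).items
      = c.items.map (fun p => if p.1 ∈ ks then (p.1, GA dv N (dv.getD p.1 []) p.2) else p) := by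
  induction ks with
  | nil =>
    intro c _ _ _
    simp
  | cons ii ks ih =>
    intro c hnd hksnd hcont
    simp only [List.foldl_cons]
    rw [foldJ dv N ii _ c hnd (hcont ii (by simp))]
    have hnd' := PySem.Dict.nodup_keys_insert c ii (GA dv N (dv.getD ii []) (c.getD ii [])) hnd
    rw [ih _ hnd' (List.Nodup.of_cons hksnd)
      (fun k hk => by rw [PySem.Dict.contains_insert]; simp [hcont k (List.mem_cons_of_mem _ hk)])]
    rw [PySem.Dict.items_insert_of_contains c _ (hcont ii (by simp)), List.map_map]
    apply List.map_congr_left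
    intro p hp
    have hii_not : ii ∉ ks := (List.nodup_cons.1 hksnd).1
    by_cases h : p.1 = ii
    · have hv : c.getD ii [] = p.2 := by
        have : (p.1, p.2) ∈ c.items := hp
        rw [← h]; exact PySem.Dict.getD_of_mem_items c this hnd []
      simp only [Function.comp_apply, h, beq_self_eq_true, if_true]
      rw [if_neg (by simpa using hii_not), if_pos (by simp)]
      rw [hv]
    · simp only [Function.comp_apply, beq_iff_eq, h, if_false]
      by_cases hmem : p.1 ∈ ks
      · rw [if_pos hmem, if_pos (by simp [hmem])]
      · rw [if_neg hmem, if_neg (by simp [h, hmem])]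
lemma A_shape (N : Int) :
    prepare_connections N
      = (PySem.List.pyRange 2 (N + 1) 1).map
          (fun n => (n, GA (divD N) N ((divD N).getD n []) ((divD N).getD n []))) := by
  have hrfl : prepare_connections N
      = ((PySem.List.pyRange 2 (N + 1) 1).foldl (fun c ii =>
          ((divD N).getD ii []).foldl (fun c jj =>
            (PySem.List.pyRange 2 (N + 1) 1).foldl (fun c kk =>
              if ((divD N).getD kk []).contains jj && !((c.getD ii []).contains kk)
              then c.insert ii (c.getD ii [] ++ [kk]) else c) c) c) (divD N)).items := rfl
  rw [hrfl]
  rw [foldI (divD N) N (PySem.List.pyRange 2 (N + 1) 1) (divD N)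
    (fold_insert_nodup_keys _ _) (PySem.List.nodup_pyRange_one _ _)
    (fun k hk => fold_insert_contains _ _ k hk)]
  have hitems : (divD N).items
      = (PySem.List.pyRange 2 (N + 1) 1).map (fun n => (n, get_divisors n)) :=
    fold_insert_items _ _ (PySem.List.nodup_pyRange_one _ _)
  rw [hitems, List.map_map]
  apply List.map_congr_left
  intro n hn
  have hgd : (divD N).getD n [] = get_divisors n :=
    fold_insert_getD _ _ (PySem.List.nodup_pyRange_one _ _) n hn
  simp only [Function.comp_apply, if_pos hn, hgd]

lemma B_shape (N : Int) :
    prepare_connections_alt N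
      = (PySem.List.pyRange 2 (N + 1) 1).map (fun n => (n, altConnect (altDivisors n) N)) := by
  have hrfl : prepare_connections_alt N
      = ((PySem.List.pyRange 2 (N + 1) 1).foldl (fun c n =>
          c.insert n (altConnect (((PySem.List.pyRange 2 (N + 1) 1).foldl
            (fun d n => d.insert n (altDivisors n)) PySem.Dict.empty).getD n []) N))
          PySem.Dict.empty).items := rfl
  rw [hrfl]
  rw [fold_insert_items _ _ (PySem.List.nodup_pyRange_one _ _)]
  apply List.map_congr_left
  intro n hn
  rw [fold_insert_getD _ _ (PySem.List.nodup_pyRange_one _ _) n hn]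
lemma contains_divD (N kk j : Int) (hkk : kk ∈ PySem.List.pyRange 2 (N + 1) 1) (hj : 2 ≤ j) :
    ((divD N).getD kk []).contains j = decide (j ∣ kk) := by
  have hkk2 : 2 ≤ kk := (PySem.List.mem_pyRange_one.1 hkk).1
  have hgd : (divD N).getD kk [] = get_divisors kk :=
    fold_insert_getD _ _ (PySem.List.nodup_pyRange_one _ _) kk hkk
  rw [hgd, divisors_eq kk hkk2]
  rcases Bool.eq_false_or_eq_true (decide (j ∣ kk)) with h | h
  · rw [h]
    rw [decide_eq_true_eq] at h
    rw [List.contains_iff_mem, mem_altDivisors]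
    exact ⟨hj, by have := Int.le_of_dvd (by omega) h; omega, h⟩
  · rw [h]
    rw [decide_eq_false_iff_not] at h
    rw [← Bool.not_eq_true, List.contains_iff_mem, mem_altDivisors]
    tauto


lemma filter_dvd_eq_multiples (j N : Int) (hj : 2 ≤ j) :
    (PySem.List.pyRange 2 (N + 1) 1).filter (fun kk => decide (j ∣ kk))
      = PySem.List.pyRange j (N + 1) j := by
  have hp1 : ((PySem.List.pyRange 2 (N + 1) 1).filter (fun kk => decide (j ∣ kk))).Pairwise (· < ·) :=
    (PySem.List.pairwise_lt_pyRange_one 2 (N + 1)).filter _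
  have hp2 : (PySem.List.pyRange j (N + 1) j).Pairwise (· < ·) := by
    rw [PySem.List.pyRange_of_pos j (N + 1) (by omega)]
    apply List.Pairwise.map
    · intro a b (hab : a < b)
      have : j * (a : Int) < j * (b : Int) := by
        apply mul_lt_mul_of_pos_left (by exact_mod_cast hab) (by omega)
      omega
    · exact List.pairwise_lt_range
  have hmem : ∀ x : Int, x ∈ (PySem.List.pyRange 2 (N + 1) 1).filter (fun kk => decide (j ∣ kk))
      ↔ x ∈ PySem.List.pyRange j (N + 1) j := by
    intro x
    rw [List.mem_filter, PySem.List.mem_pyRange_one,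
      PySem.List.mem_pyRange_iff_of_pos (by omega : (0:Int) < j), decide_eq_true_eq]
    constructor
    · rintro ⟨⟨hx2, hxN⟩, hdvd⟩
      exact ⟨Int.le_of_dvd (by omega) hdvd, hxN, dvd_sub hdvd dvd_rfl⟩
    · rintro ⟨hjx, hxN, hdvd⟩
      have hx : j ∣ x := by
        have h2 := dvd_add hdvd (dvd_refl j)
        simpa using h2
      exact ⟨⟨by omega, hxN⟩, hx⟩
  have hperm := (List.perm_ext_iff_of_nodup (hp1.imp ne_of_lt) (hp2.imp ne_of_lt)).2 hmem
  exact hperm.eq_of_pairwise (fun a b _ _ hab hba => absurd hab (not_lt.2 hba.le)) hp1 hp2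
lemma AInner_eq (N j : Int) (hj : 2 ≤ j) (l : List Int) :
    (PySem.List.pyRange 2 (N + 1) 1).foldl (fun l kk =>
        if ((divD N).getD kk []).contains j && !(l.contains kk) then l ++ [kk] else l) l
      = (PySem.List.pyRange j (N + 1) j).foldl (fun l k =>
          if !(l.contains k) then l ++ [k] else l) l := by
  rw [PySem.List.foldl_congr_mem _ _
    (fun l kk => if decide (j ∣ kk) && !(l.contains kk) then l ++ [kk] else l) l
    (fun acc kk hkk => by rw [contains_divD N kk j hkk hj])]
  rw [PySem.List.foldl_congr_mem _ _
    (fun l kk => if decide (j ∣ kk) then (if !(l.contains kk) then l ++ [kk] else l) else l) l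
    (fun acc kk _ => by
      rcases Bool.eq_false_or_eq_true (decide (j ∣ kk)) with h | h <;> simp [h])]
  rw [PySem.List.foldl_if_eq_foldl_filter (fun kk => decide (j ∣ kk))
    (fun l k => if !(l.contains k) then l ++ [k] else l)]
  rw [filter_dvd_eq_multiples j N hj]

lemma pairFold (ks : List Int) :
    ∀ (l : List Int) (s : PySem.Set Int), (∀ x : Int, x ∈ s ↔ x ∈ l) →
    (ks.foldl (fun sl k => if sl.1.contains k then sl else (sl.1.add k, sl.2 ++ [k]))
        ((s, l) : PySem.Set Int × List Int)).2
      = ks.foldl (fun l k => if !(l.contains k) then l ++ [k] else l) l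
    ∧ ∀ x : Int,
        x ∈ (ks.foldl (fun sl k => if sl.1.contains k then sl else (sl.1.add k, sl.2 ++ [k]))
          ((s, l) : PySem.Set Int × List Int)).1
        ↔ x ∈ (ks.foldl (fun sl k => if sl.1.contains k then sl else (sl.1.add k, sl.2 ++ [k]))
          ((s, l) : PySem.Set Int × List Int)).2 := by
  induction ks with
  | nil => intro l s hinv; exact ⟨rfl, hinv⟩
  | cons k ks ih =>
    intro l s hinv
    simp only [List.foldl_cons]
    by_cases hk : k ∈ l
    · have hs : s.contains k = true := (PySem.Set.contains_iff s k).2 ((hinv k).2 hk)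
      have hl : l.contains k = true := List.contains_iff_mem.2 hk
      rw [hs, if_pos rfl, hl]
      simpa using ih l s hinv
    · have hs : s.contains k = false := by
        rw [← Bool.not_eq_true, PySem.Set.contains_iff]
        exact fun h => hk ((hinv k).1 h)
      have hl : l.contains k = false := by
        rw [← Bool.not_eq_true, List.contains_iff_mem]; exact hk
      rw [hs, hl]
      simp only [Bool.false_eq_true, if_false, Bool.not_false, if_true]
      exact ih (l ++ [k]) (s.add k) (fun x => by
        rw [PySem.Set.mem_add, List.mem_append, List.mem_singleton, hinv x])
lemma GA_eq_connect (N : Int) (js : List Int) (hjs : ∀ j ∈ js, 2 ≤ j) :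
    ∀ (l : List Int) (s : PySem.Set Int), (∀ x : Int, x ∈ s ↔ x ∈ l) →
    GA (divD N) N js l
      = (js.foldl (fun sl j =>
          (PySem.List.pyRange j (N + 1) j).foldl (fun sl k =>
            if sl.1.contains k then sl else (sl.1.add k, sl.2 ++ [k])) sl)
          ((s, l) : PySem.Set Int × List Int)).2 := by
  induction js with
  | nil => intro l s _; rfl
  | cons j js ih =>
    intro l s hinv
    have hj : 2 ≤ j := hjs j (by simp)
    simp only [List.foldl_cons, GA]
    obtain ⟨hpf1, hpf2⟩ := pairFold (PySem.List.pyRange j (N + 1) j) l s hinv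
    generalize hP : (PySem.List.pyRange j (N + 1) j).foldl (fun sl k =>
        if sl.1.contains k then sl else (sl.1.add k, sl.2 ++ [k]))
        ((s, l) : PySem.Set Int × List Int) = P at hpf1 hpf2 ⊢
    obtain ⟨s', l'⟩ := P
    have hstep : (PySem.List.pyRange 2 (N + 1) 1).foldl (fun l kk =>
        if ((divD N).getD kk []).contains j && !(l.contains kk) then l ++ [kk] else l) l = l' := by
      rw [AInner_eq N j hj l]; exact hpf1.symm
    rw [← GA, hstep]
    exact ih (fun j hmem => hjs j (List.mem_cons_of_mem _ hmem)) l' s' hpf2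

lemma pointwise (N n : Int) (hn : n ∈ PySem.List.pyRange 2 (N + 1) 1) :
    GA (divD N) N ((divD N).getD n []) ((divD N).getD n []) = altConnect (altDivisors n) N := by
  have hn2 : 2 ≤ n := (PySem.List.mem_pyRange_one.1 hn).1
  have hgd : (divD N).getD n [] = altDivisors n := by
    unfold divD
    rw [fold_insert_getD _ _ (PySem.List.nodup_pyRange_one _ _) n hn, divisors_eq n hn2]
  rw [hgd]
  unfold altConnect
  exact GA_eq_connect N (altDivisors n)
    (fun j hj => ((mem_altDivisors n j).1 hj).1)
    (altDivisors n) (PySem.Set.ofList (altDivisors n))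
    (fun x => PySem.Set.mem_ofList _ x)

-- ===== VERDICT (by name: the statement is the Claim_ definition above) =====
theorem prepare_connections_spec : Claim_equal_prepare_connections := by
  intro N _
  unfold Spec_prepare_connections
  rw [A_shape, B_shape]
  exact List.map_congr_left (fun n hn => by rw [pointwise N n hn])
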